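-- pv_equiv track=rewrite | github.com/readjfb/AdventOfCode-2025 | day2/day2.py | generate_divisor_list
-- ===== SOURCE A (Python) =====
-- def generate_divisor_list(len_max_upper_range):
--     divisors = {}
--
--     for n in range(len_max_upper_range + 1):
--         divisors_list = []
--         for divisor in range(n - 1, 0, -1):
--             if n % divisor == 0:
--                 flag = True
--                 for d in divisors_list:
--                     if d % divisor == 0:
--                         flag = False
--                         break
--                 if flag:
--                     divisors_list.append(divisor)
--
--         if (n % 2 == 0) and (n // 2) in divisors_list:
--             divisors_list.remove(n // 2)
--
--         divisors[n] = divisors_list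
--     return divisors
-- ===== SOURCE B (Python) =====
-- def generate_divisor_list(len_max_upper_range):
--     # The maximal proper divisors of n are exactly n//p over the distinct prime
--     # factors p of n (p ascending <=> n//p descending), and A's final removal of
--     # n//2 just drops the p == 2 entry; so factor n by trial division instead of
--     # scanning all smaller numbers.
--     divisors = {}
--     for n in range(len_max_upper_range + 1):
--         lst = []
--         m = n
--         p = 2
--         while p * p <= m:
--             if m % p == 0:
--                 if p != 2:
--                     lst.append(n // p)
--                 while m % p == 0:
--                     m //= p
--             p += 1
--         if m > 2:
--             lst.append(n // m)
--         divisors[n] = lst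
--     return divisors
-- ===== Notes on version B (the rewrite author's own statement) =====
-- stated objective: faster
-- what changed: Instead of scanning every d from n-1 down to 1 and keeping d when no kept divisor is a multiple (then removing n//2), B trial-divides n into its distinct prime factors and emits n//p for each prime factor p != 2 in ascending p order, which is exactly the same list.
import Mathlib
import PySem

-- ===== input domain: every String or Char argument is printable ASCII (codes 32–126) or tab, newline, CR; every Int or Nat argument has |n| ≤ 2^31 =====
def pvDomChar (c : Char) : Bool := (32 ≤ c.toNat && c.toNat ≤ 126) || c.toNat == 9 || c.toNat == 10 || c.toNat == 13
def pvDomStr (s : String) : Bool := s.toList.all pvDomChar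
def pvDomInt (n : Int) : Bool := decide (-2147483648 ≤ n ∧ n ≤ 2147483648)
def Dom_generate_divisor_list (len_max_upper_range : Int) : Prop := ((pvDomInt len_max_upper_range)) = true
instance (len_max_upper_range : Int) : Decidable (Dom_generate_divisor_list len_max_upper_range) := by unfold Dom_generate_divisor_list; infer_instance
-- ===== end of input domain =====

-- B replaces A's quadratic scan over all d < n (keeping d when no kept divisor is a
-- multiple, then removing n//2) by trial-division factorisation of n, emitting n//p for
-- each distinct prime factor p ≠ 2 in ascending p order; objective: faster.

-- ===== PORT A =====
-- the inner 'for d in divisors_list: if d % divisor == 0: flag=False; break' loop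
def pvCheckFlag (acc : List Int) (divisor : Int) : Bool :=
  match acc with
  | [] => true
  | d :: rest => if PySem.Int.mod d divisor == 0 then false else pvCheckFlag rest divisor

-- the 'for divisor in range(n-1, 0, -1)' loop building divisors_list
def pvInnerA (n : Int) : List Int :=
  (PySem.List.pyRange (n - 1) 0 (-1)).foldl
    (fun acc divisor =>
      if PySem.Int.mod n divisor == 0 then
        if pvCheckFlag acc divisor then acc ++ [divisor] else acc
      else acc) []

-- divisors_list after the conditional 'divisors_list.remove(n // 2)'
def pvRowA (n : Int) : List Int :=
  if PySem.Int.mod n 2 == 0 && (pvInnerA n).contains (PySem.Int.floordiv n 2) then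
    -- the guard ensures membership, so remove? is some
    (PySem.List.remove? (pvInnerA n) (PySem.Int.floordiv n 2)).getD (pvInnerA n)
  else pvInnerA n

def generate_divisor_list (len_max_upper_range : Int) : List (Int × List Int) :=
  ((PySem.List.pyRange 0 (len_max_upper_range + 1) 1).foldl
    (fun d n => PySem.Dict.insert d n (pvRowA n)) PySem.Dict.empty).items

-- ===== PORT B =====
-- the inner 'while m % p == 0: m //= p' loop (fuel only makes it total; m.toNat steps suffice)
def pvStrip (p : Int) : Nat → Int → Int
  | 0, m => m
  | fuel + 1, m =>
    if PySem.Int.mod m p == 0 then pvStrip p fuel (PySem.Int.floordiv m p) else m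

-- the 'while p * p <= m' loop plus the trailing 'if m > 2: lst.append(n // m)'
def pvLoopB (n : Int) : Nat → Int → Int → List Int → List Int
  | 0, _, _, lst => lst   -- out of fuel; never reached with the fuel pvInnerB supplies
  | fuel + 1, m, p, lst =>
    if p * p ≤ m then
      if PySem.Int.mod m p == 0 then
        pvLoopB n fuel (pvStrip p m.toNat m) (p + 1)
          (lst ++ if p ≠ 2 then [PySem.Int.floordiv n p] else [])
      else pvLoopB n fuel m (p + 1) lst
    else if 2 < m then lst ++ [PySem.Int.floordiv n m] else lst

def pvInnerB (n : Int) : List Int := pvLoopB n (n.toNat + 1) n 2 []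

def generate_divisor_list_alt (len_max_upper_range : Int) : List (Int × List Int) :=
  ((PySem.List.pyRange 0 (len_max_upper_range + 1) 1).foldl
    (fun d n => PySem.Dict.insert d n (pvInnerB n)) PySem.Dict.empty).items

-- ===== PRECONDITION & SPEC =====
def Spec_generate_divisor_list (len_max_upper_range : Int) (out : List (Int × List Int)) : Prop := out = generate_divisor_list_alt len_max_upper_range
instance (len_max_upper_range : Int) (out : List (Int × List Int)) : Decidable (Spec_generate_divisor_list len_max_upper_range out) := by unfold Spec_generate_divisor_list; infer_instance

-- ===== CLAIM (what is proved, stated in full; the proofs are below) =====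
def Claim_equal_generate_divisor_list : Prop := ∀ (len_max_upper_range : Int), Dom_generate_divisor_list len_max_upper_range → Spec_generate_divisor_list len_max_upper_range (generate_divisor_list len_max_upper_range)

-- ===== LEMMAS AND PROOFS =====

-- Boolean test: d is a maximal proper divisor of n (∀ bounded by a range list)
def pvMaxDiv (n d : Int) : Bool :=
  decide (0 < d) && decide (d < n) && decide (d ∣ n) &&
    (PySem.List.pyRange (n - 1) 0 (-1)).all
      (fun e => !(decide (d < e) && decide (e ∣ n) && decide (d ∣ e)))

-- ascending list of the odd prime divisors of m
def pvOPF (m : Int) : List Int :=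
  (PySem.List.pyRange 3 (m + 1) 1).filter
    (fun q => decide (q ∣ m) && decide (Nat.Prime q.toNat))

lemma pv_mem_range_iff (n x : Int) :
    x ∈ PySem.List.pyRange (n - 1) 0 (-1) ↔ 0 < x ∧ x < n := by
  rw [PySem.List.mem_pyRange_neg_one]; omega

lemma pvMaxDiv_iff (n d : Int) :
    pvMaxDiv n d = true ↔ 0 < d ∧ d < n ∧ d ∣ n ∧ ∀ e, d < e → e < n → e ∣ n → ¬ d ∣ e := by
  unfold pvMaxDiv
  simp only [Bool.and_eq_true, decide_eq_true_eq, List.all_eq_true, pv_mem_range_iff,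
    Bool.not_eq_true', Bool.and_eq_false_iff, decide_eq_false_iff_not]
  constructor
  · rintro ⟨⟨⟨h1, h2⟩, h3⟩, h4⟩
    refine ⟨h1, h2, h3, fun e he1 he2 he3 hde => ?_⟩
    rcases h4 e ⟨by omega, he2⟩ with h | h
    · rcases h with h | h
      · exact h he1
      · exact h he3
    · exact h hde
  · rintro ⟨h1, h2, h3, h4⟩
    refine ⟨⟨⟨h1, h2⟩, h3⟩, fun e he => ?_⟩
    by_cases hlt : d < e
    · by_cases hdv : e ∣ n
      · exact Or.inr (h4 e hlt he.2 hdv)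
      · exact Or.inl (Or.inr hdv)
    · exact Or.inl (Or.inl hlt)

lemma pvCheckFlag_iff (acc : List Int) (d : Int) :
    pvCheckFlag acc d = true ↔ ∀ e ∈ acc, ¬ d ∣ e := by
  induction acc with
  | nil => simp [pvCheckFlag]
  | cons a t ih =>
    simp only [pvCheckFlag]
    by_cases h : d ∣ a
    · have : (PySem.Int.mod a d == 0) = true := by
        rw [beq_iff_eq]; exact (PySem.Int.mod_eq_zero_iff_dvd a d).mpr h
      simp [this, h]
    · have : (PySem.Int.mod a d == 0) = false := by
        rw [beq_eq_false_iff_ne]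
        intro hc; exact h ((PySem.Int.mod_eq_zero_iff_dvd a d).mp hc)
      simp [this, ih, h]

-- every proper divisor has a maximal proper divisor above it (as a multiple)
lemma pv_exists_max (n : Int) :
    ∀ k : Nat, ∀ e : Int, (n - e).toNat = k → 0 < e → e < n → e ∣ n →
      ∃ m, pvMaxDiv n m = true ∧ e ∣ m ∧ e ≤ m := by
  intro k
  induction k using Nat.strong_induction_on with
  | _ k ih =>
    intro e hk he1 he2 he3
    by_cases hmax : pvMaxDiv n e = true
    · exact ⟨e, hmax, dvd_refl e, le_refl e⟩
    · rw [pvMaxDiv_iff] at hmax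
      push Not at hmax
      obtain ⟨f, hf1, hf2, hf3, hf4⟩ := hmax he1 he2 he3
      obtain ⟨m, hm1, hm2, hm3⟩ :=
        ih (n - f).toNat (by omega) f rfl (by omega) hf2 hf3
      exact ⟨m, hm1, dvd_trans hf4 hm2, by omega⟩

lemma pv_range_pairwise (n : Int) :
    (PySem.List.pyRange (n - 1) 0 (-1)).Pairwise (fun a b => b < a) := by
  rw [PySem.List.pyRange_neg_one_eq_reverse]
  rw [List.pairwise_reverse]
  exact PySem.List.pairwise_lt_pyRange_one _ _

-- the key step of A's scan: processing candidate d extends the filtered prefix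
lemma pv_step (n : Int) (l1 l2 : List Int) (d : Int)
    (h : PySem.List.pyRange (n - 1) 0 (-1) = l1 ++ d :: l2) :
    (if PySem.Int.mod n d == 0 then
       if pvCheckFlag (l1.filter (fun x => pvMaxDiv n x)) d then
         l1.filter (fun x => pvMaxDiv n x) ++ [d]
       else l1.filter (fun x => pvMaxDiv n x)
     else l1.filter (fun x => pvMaxDiv n x)) =
    (l1 ++ [d]).filter (fun x => pvMaxDiv n x) := by
  have hd : 0 < d ∧ d < n := by
    rw [← pv_mem_range_iff n d, h]; exact List.mem_append_right _ (List.mem_cons_self ..)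
  have hpw : (l1 ++ d :: l2).Pairwise (fun a b => b < a) := h ▸ pv_range_pairwise n
  have hgt : ∀ x ∈ l1, d < x := by
    intro x hx
    exact (List.pairwise_append.mp hpw).2.2 x hx d (List.mem_cons_self ..)
  have hcover : ∀ y, d < y → y < n → y ∣ n → y ∈ l1 := by
    intro y hy1 hy2 _
    have hmem : y ∈ l1 ++ d :: l2 := by
      rw [← h, pv_mem_range_iff]; omega
    rcases List.mem_append.mp hmem with h1 | h1
    · exact h1
    · rcases List.mem_cons.mp h1 with rfl | h1
      · omega
      · exfalso
        have := (List.pairwise_cons.mp (List.pairwise_append.mp hpw).2.1).1 y h1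
        omega
  have hl1mem : ∀ x ∈ l1, 0 < x ∧ x < n := by
    intro x hx
    rw [← pv_mem_range_iff n x, h]; exact List.mem_append_left _ hx
  by_cases hdvd : d ∣ n
  · have hmod : (PySem.Int.mod n d == 0) = true := by
      rw [beq_iff_eq]; exact (PySem.Int.mod_eq_zero_iff_dvd n d).mpr hdvd
    rw [hmod, if_pos rfl]
    by_cases hflag : pvCheckFlag (l1.filter (fun x => pvMaxDiv n x)) d = true
    · rw [if_pos hflag]
      have hmax : pvMaxDiv n d = true := by
        rw [pvMaxDiv_iff]
        refine ⟨hd.1, hd.2, hdvd, fun e he1 he2 he3 hde => ?_⟩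
        obtain ⟨m, hm1, hm2, hm3⟩ :=
          pv_exists_max n (n - e).toNat e rfl (by omega) he2 he3
        have hm4 := (pvMaxDiv_iff n m).mp hm1
        have hml1 : m ∈ l1 := hcover m (by omega) hm4.2.1 hm4.2.2.1
        have hmf : m ∈ l1.filter (fun x => pvMaxDiv n x) :=
          List.mem_filter.mpr ⟨hml1, hm1⟩
        exact (pvCheckFlag_iff _ d).mp hflag m hmf (dvd_trans hde hm2)
      rw [List.filter_append]
      simp [hmax]
    · rw [if_neg hflag]
      have hnmax : ¬ pvMaxDiv n d = true := by
        intro hmax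
        apply hflag
        rw [pvCheckFlag_iff]
        intro e hef hde
        have he := List.mem_filter.mp hef
        have hemax : pvMaxDiv n e = true := he.2
        have he1 := hgt e he.1
        have he2 := (pvMaxDiv_iff n e).mp hemax
        exact (pvMaxDiv_iff n d).mp hmax |>.2.2.2 e he1 he2.2.1 he2.2.2.1 hde
      rw [List.filter_append]
      simp [hnmax]
  · have hmod : (PySem.Int.mod n d == 0) = false := by
      rw [beq_eq_false_iff_ne]
      intro hc; exact hdvd ((PySem.Int.mod_eq_zero_iff_dvd n d).mp hc)
    rw [hmod]
    have hnmax : ¬ pvMaxDiv n d = true := fun hmax => hdvd ((pvMaxDiv_iff n d).mp hmax).2.2.1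
    rw [List.filter_append]
    simp [hnmax]

lemma pv_scan (n : Int) : ∀ (l2 l1 : List Int),
    PySem.List.pyRange (n - 1) 0 (-1) = l1 ++ l2 →
    l2.foldl (fun acc divisor =>
        if PySem.Int.mod n divisor == 0 then
          if pvCheckFlag acc divisor then acc ++ [divisor] else acc
        else acc)
      (l1.filter (fun x => pvMaxDiv n x)) =
    (PySem.List.pyRange (n - 1) 0 (-1)).filter (fun x => pvMaxDiv n x) := by
  intro l2
  induction l2 with
  | nil => intro l1 h; rw [List.foldl_nil, h, List.append_nil]
  | cons d t ih =>
    intro l1 h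
    rw [List.foldl_cons, pv_step n l1 t d h]
    exact ih (l1 ++ [d]) (by rw [h, List.append_assoc]; rfl)

lemma pvInnerA_eq (n : Int) :
    pvInnerA n = (PySem.List.pyRange (n - 1) 0 (-1)).filter (fun x => pvMaxDiv n x) := by
  have := pv_scan n (PySem.List.pyRange (n - 1) 0 (-1)) [] (by simp)
  simpa [pvInnerA] using this

-- Int prime bridge
lemma pv_int_prime (p : Int) (h2 : 2 ≤ p) (hp : Nat.Prime p.toNat) : Prime p := by
  rw [Int.prime_iff_natAbs_prime]
  have h : p.natAbs = p.toNat := by omega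
  rwa [h]

lemma pv_prime_dvd_prime (q p : Int) (h2q : 2 ≤ q) (h2p : 2 ≤ p)
    (hq : Nat.Prime q.toNat) (hp : Nat.Prime p.toNat) (hdvd : q ∣ p) : q = p := by
  have h1 : q.natAbs ∣ p.natAbs := Int.natAbs_dvd_natAbs.mpr hdvd
  have h2 : q.natAbs = q.toNat := by omega
  have h3 : p.natAbs = p.toNat := by omega
  rw [h2, h3] at h1
  have := (Nat.prime_dvd_prime_iff_eq hq hp).mp h1
  omega

-- characterisation: maximal proper divisors are exactly n/p for prime p ∣ n
lemma pvMaxDiv_iff_cof (n d : Int) (hn : 0 < n) :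
    pvMaxDiv n d = true ↔ ∃ p : Int, 2 ≤ p ∧ Nat.Prime p.toNat ∧ p ∣ n ∧ d = n / p := by
  rw [pvMaxDiv_iff]
  constructor
  · rintro ⟨h1, h2, ⟨c, hc⟩, h4⟩
    have hc1 : 1 < c := by nlinarith
    have hcnat : c.toNat ≠ 1 := by omega
    obtain ⟨r, hr, hrdvd⟩ := Nat.exists_prime_and_dvd hcnat
    have hrc : (r : Int) ∣ c := by
      have := Int.natCast_dvd_natCast.mpr hrdvd
      rwa [Int.toNat_of_nonneg (by omega)] at this
    obtain ⟨s, hs⟩ := hrc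
    have hr2 : 2 ≤ (r : Int) := by exact_mod_cast hr.two_le
    have hs1 : 0 < s := by nlinarith
    have hse : s = 1 := by
      by_contra hs2
      have hs2' : 1 < s := by
        rcases lt_or_gt_of_ne hs2 with h | h
        · omega
        · exact h
      -- e := d * s is a proper multiple of d dividing n
      have he1 : d < d * s := by nlinarith
      have he2 : d * s < n := by
        have : n = (d * s) * r := by rw [hc, hs]; ring
        nlinarith
      have he3 : d * s ∣ n := ⟨r, by rw [hc, hs]; ring⟩
      exact absurd (Dvd.intro s rfl) (h4 (d * s) he1 he2 he3)
    have hcr : c = r := by rw [hs, hse, mul_one]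
    refine ⟨c, by omega, ?_, ⟨d, by rw [hc]; ring⟩, ?_⟩
    · have : c.toNat = r := by omega
      rwa [this]
    · rw [hc, mul_comm d c, Int.mul_ediv_cancel_left _ (by omega)]
  · rintro ⟨p, hp2, hpp, ⟨c, hc⟩, hd⟩
    have hc0 : 0 < c := by nlinarith
    have hdc : d = c := by rw [hd, hc, Int.mul_ediv_cancel_left _ (by omega)]
    subst hdc
    refine ⟨by omega, by nlinarith, ⟨p, by rw [hc]; ring⟩, ?_⟩
    intro e he1 he2 ⟨f, hf⟩ ⟨k, hk⟩
    -- e = d * k, e ∣ n = d * p  ⇒  k ∣ p  ⇒  k = p (k > 1) ⇒ e = n, contradiction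
    have hk1 : 1 < k := by nlinarith
    have hkdvd : k ∣ p := by
      have hmul : d * p = d * (k * f) := by
        calc d * p = n := by rw [hc]; ring
          _ = e * f := hf
          _ = d * (k * f) := by rw [hk]; ring
      have : p = k * f := by
        have := mul_left_cancel₀ (a := d) (by omega) hmul
        linarith [this]
      exact ⟨f, this⟩
    have hkp : k = p := by
      have hk2 : 2 ≤ k := by omega
      have hkn : Nat.Prime k.toNat := by
        by_contra hknp
        obtain ⟨r, hr, hrdvd⟩ := Nat.exists_prime_and_dvd (by omega : k.toNat ≠ 1)
        have hrk : (r : Int) ∣ k := by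
          have := Int.natCast_dvd_natCast.mpr hrdvd
          rwa [Int.toNat_of_nonneg (by omega)] at this
        have hrp : (r : Int) ∣ p := dvd_trans hrk hkdvd
        have hr2 : 2 ≤ (r : Int) := by exact_mod_cast hr.two_le
        have : (r : Int) = p := by
          apply pv_prime_dvd_prime _ _ hr2 hp2 _ hpp hrp
          simpa using hr
        -- then k is a multiple of p with k ∣ p, so k = p, prime — contradiction
        have hkp' : p ∣ k := this ▸ hrk
        have : k = p := le_antisymm (Int.le_of_dvd (by omega) hkdvd) (Int.le_of_dvd (by omega) hkp')
        rw [this] at hknp; exact hknp hpp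
      exact pv_prime_dvd_prime k p hk2 hp2 hkn hpp hkdvd
    rw [hkp] at hk
    have : e = n := by rw [hk, hc]; ring
    omega

-- uniqueness of strictly ordered lists with the same members
lemma pv_uniq_lt (l1 l2 : List Int) (h1 : l1.Pairwise (· < ·)) (h2 : l2.Pairwise (· < ·))
    (hm : ∀ x, x ∈ l1 ↔ x ∈ l2) : l1 = l2 := by
  have nd1 : l1.Nodup := h1.imp ne_of_lt
  have nd2 : l2.Nodup := h2.imp ne_of_lt
  have hperm : l1.Perm l2 := (List.perm_ext_iff_of_nodup nd1 nd2).mpr hm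
  exact PySem.List.eq_of_perm_of_pairwise_le_of_injective (fun x => x) (fun a b h => h)
    hperm (h1.imp le_of_lt) (h2.imp le_of_lt)

lemma pv_uniq_gt (l1 l2 : List Int) (h1 : l1.Pairwise (fun a b => b < a))
    (h2 : l2.Pairwise (fun a b => b < a)) (hm : ∀ x, x ∈ l1 ↔ x ∈ l2) : l1 = l2 := by
  have nd1 : l1.Nodup := h1.imp (fun h => (ne_of_lt h).symm)
  have nd2 : l2.Nodup := h2.imp (fun h => (ne_of_lt h).symm)
  have hperm : l1.Perm l2 := (List.perm_ext_iff_of_nodup nd1 nd2).mpr hm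
  exact PySem.List.eq_of_perm_of_pairwise_le_of_injective (fun x => -x)
    neg_injective hperm (h1.imp (fun h => by dsimp only; omega))
    (h2.imp (fun h => by dsimp only; omega))

lemma pvOPF_mem (m x : Int) (hm : 0 < m) :
    x ∈ pvOPF m ↔ 3 ≤ x ∧ x ∣ m ∧ Nat.Prime x.toNat := by
  unfold pvOPF
  rw [List.mem_filter, PySem.List.mem_pyRange_one]
  constructor
  · rintro ⟨⟨hx1, _⟩, hx2⟩
    simp only [Bool.and_eq_true, decide_eq_true_eq] at hx2
    exact ⟨hx1, hx2.1, hx2.2⟩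
  · rintro ⟨hx1, hx2, hx3⟩
    have := Int.le_of_dvd hm hx2
    refine ⟨⟨hx1, by omega⟩, ?_⟩
    simp only [Bool.and_eq_true, decide_eq_true_eq]
    exact ⟨hx2, hx3⟩

lemma pvOPF_pairwise (m : Int) : (pvOPF m).Pairwise (· < ·) :=
  (PySem.List.pairwise_lt_pyRange_one 3 (m + 1)).filter _

-- strict antitonicity of q ↦ n / q on divisors
lemma pv_div_lt_div (n a b : Int) (hn : 0 < n) (ha : 0 < a) (hab : a < b)
    (hda : a ∣ n) (hdb : b ∣ n) : n / b < n / a := by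
  obtain ⟨c, hc⟩ := hda
  obtain ⟨e, he⟩ := hdb
  have h1 : n / a = c := by rw [hc, Int.mul_ediv_cancel_left _ (by omega)]
  have h2 : n / b = e := by rw [he, Int.mul_ediv_cancel_left _ (by omega)]
  rw [h1, h2]
  have hc0 : 0 < c := by nlinarith
  have he0 : 0 < e := by nlinarith
  have heq : a * c = b * e := hc.symm.trans he
  nlinarith [heq]

lemma pv_map_div_pairwise (n : Int) (hn : 0 < n) (l : List Int) (hl : l.Pairwise (· < ·))
    (hmem : ∀ q ∈ l, 0 < q ∧ q ∣ n) :
    (l.map (fun q => n / q)).Pairwise (fun a b => b < a) := by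
  rw [List.pairwise_map]
  induction l with
  | nil => exact List.Pairwise.nil
  | cons a t ih =>
    rw [List.pairwise_cons] at hl ⊢
    refine ⟨fun b hb => ?_, ih hl.2 (fun q hq => hmem q (List.mem_cons_of_mem a hq))⟩
    have hma := hmem a (List.mem_cons_self ..)
    have hmb := hmem b (List.mem_cons_of_mem a hb)
    exact pv_div_lt_div n a b hn hma.1 (hl.1 b hb) hma.2 hmb.2

-- exact-division cancellation: n/q = n/p forces q = p
lemma pv_div_inj (n p q : Int) (hn : 0 < n) (hp : 0 < p) (hq : 0 < q)
    (hdp : p ∣ n) (hdq : q ∣ n) (h : n / p = n / q) : p = q := by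
  rcases lt_trichotomy p q with hlt | heq | hgt
  · have := pv_div_lt_div n p q hn hp hlt hdp hdq; omega
  · exact heq
  · have := pv_div_lt_div n q p hn hq hgt hdq hdp; omega

-- ===== A side: pvRowA n = (pvOPF n).map (n / ·) =====

lemma pv_inner_mem (n x : Int) :
    x ∈ pvInnerA n ↔ pvMaxDiv n x = true := by
  rw [pvInnerA_eq, List.mem_filter]
  constructor
  · rintro ⟨_, h⟩; exact h
  · intro h
    have h' := (pvMaxDiv_iff n x).mp h
    exact ⟨(pv_mem_range_iff n x).mpr ⟨h'.1, h'.2.1⟩, h⟩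

lemma pv_inner_pairwise (n : Int) : (pvInnerA n).Pairwise (fun a b => b < a) := by
  rw [pvInnerA_eq]
  exact (pv_range_pairwise n).filter _

lemma pvRowA_eq (n : Int) (hn : 0 ≤ n) :
    pvRowA n = (pvOPF n).map (fun q => n / q) := by
  rcases eq_or_lt_of_le hn with hz | hpos
  · -- n = 0 : both sides are []
    subst hz; decide
  -- n ≥ 1
  have hmapmem : ∀ x, (x ∈ (pvOPF n).map (fun q => n / q)) ↔
      ∃ p : Int, 3 ≤ p ∧ Nat.Prime p.toNat ∧ p ∣ n ∧ x = n / p := by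
    intro x
    rw [List.mem_map]
    constructor
    · rintro ⟨q, hq, rfl⟩
      have := (pvOPF_mem n q hpos).mp hq
      exact ⟨q, this.1, this.2.2, this.2.1, rfl⟩
    · rintro ⟨p, h1, h2, h3, rfl⟩
      exact ⟨p, (pvOPF_mem n p hpos).mpr ⟨h1, h3, h2⟩, rfl⟩
  have hmappw : ((pvOPF n).map (fun q => n / q)).Pairwise (fun a b => b < a) := by
    apply pv_map_div_pairwise n hpos _ (pvOPF_pairwise n)
    intro q hq
    have := (pvOPF_mem n q hpos).mp hq
    exact ⟨by omega, this.2.1⟩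
  by_cases h2 : (2 : Int) ∣ n
  · -- even n ≥ 2 : the guard fires and n/2 (the head entry, p = 2) is erased
    have hn2 : 2 ≤ n := Int.le_of_dvd hpos h2
    have hfd : PySem.Int.floordiv n 2 = n / 2 := PySem.Int.floordiv_eq_ediv_of_pos (by omega)
    have hhalf : pvMaxDiv n (n / 2) = true :=
      (pvMaxDiv_iff_cof n (n / 2) hpos).mpr ⟨2, le_refl 2, by decide, h2, rfl⟩
    have hmem : n / 2 ∈ pvInnerA n := (pv_inner_mem n (n / 2)).mpr hhalf
    have hguard : (PySem.Int.mod n 2 == 0 && (pvInnerA n).contains (PySem.Int.floordiv n 2)) = true := by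
      rw [Bool.and_eq_true, beq_iff_eq, PySem.Int.mod_eq_zero_iff_dvd]
      exact ⟨h2, by rw [hfd]; exact List.contains_iff_mem.mpr hmem⟩
    unfold pvRowA
    rw [hguard, if_pos rfl, hfd]
    rw [PySem.List.remove?_eq_some_erase _ _ hmem, Option.getD_some]
    apply pv_uniq_gt
    · exact List.Pairwise.sublist (List.erase_sublist ..) (pv_inner_pairwise n)
    · exact hmappw
    · intro x
      have hnd : (pvInnerA n).Nodup := (pv_inner_pairwise n).imp (fun h => (ne_of_lt h).symm)
      rw [List.Nodup.mem_erase_iff hnd, pv_inner_mem, pvMaxDiv_iff_cof n x hpos, hmapmem]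
      constructor
      · rintro ⟨hne, p, hp2, hpp, hpd, rfl⟩
        have hp3 : 3 ≤ p := by
          rcases eq_or_lt_of_le hp2 with rfl | h
          · exact absurd rfl hne
          · omega
        exact ⟨p, hp3, hpp, hpd, rfl⟩
      · rintro ⟨p, hp3, hpp, hpd, rfl⟩
        refine ⟨?_, p, by omega, hpp, hpd, rfl⟩
        intro hcontra
        have := pv_div_inj n p 2 hpos (by omega) (by omega) hpd h2 hcontra
        omega
  · -- odd n : the guard does not fire, and all prime factors are ≥ 3
    have hguard : (PySem.Int.mod n 2 == 0 && (pvInnerA n).contains (PySem.Int.floordiv n 2)) = false := by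
      rw [Bool.and_eq_false_iff]
      left
      rw [beq_eq_false_iff_ne]
      intro hc; exact h2 ((PySem.Int.mod_eq_zero_iff_dvd n 2).mp hc)
    unfold pvRowA
    rw [hguard]
    simp only [Bool.false_eq_true, if_false]
    apply pv_uniq_gt
    · exact pv_inner_pairwise n
    · exact hmappw
    · intro x
      rw [pv_inner_mem, pvMaxDiv_iff_cof n x hpos, hmapmem]
      constructor
      · rintro ⟨p, hp2, hpp, hpd, rfl⟩
        have hp3 : 3 ≤ p := by
          rcases eq_or_lt_of_le hp2 with rfl | h
          · exact absurd hpd h2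
          · omega
        exact ⟨p, hp3, hpp, hpd, rfl⟩
      · rintro ⟨p, hp3, hpp, hpd, rfl⟩
        exact ⟨p, by omega, hpp, hpd, rfl⟩

-- ===== B side: pvInnerB n = (pvOPF n).map (n / ·) =====

lemma pvStrip_spec (p : Int) (hp : 2 ≤ p) :
    ∀ fuel (m : Int), 0 < m → m.toNat ≤ fuel →
      ∃ (k : Nat) (m' : Int), pvStrip p fuel m = m' ∧ m = p ^ k * m' ∧ 0 < m' ∧ ¬ p ∣ m' := by
  intro fuel
  induction fuel with
  | zero => intro m hm hf; omega
  | succ fuel ih =>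
    intro m hm hf
    by_cases hdvd : p ∣ m
    · have hmod : (PySem.Int.mod m p == 0) = true := by
        rw [beq_iff_eq]; exact (PySem.Int.mod_eq_zero_iff_dvd m p).mpr hdvd
      obtain ⟨c, hc⟩ := hdvd
      have hc0 : 0 < c := by nlinarith
      have hfd : PySem.Int.floordiv m p = c := by
        rw [PySem.Int.floordiv_eq_ediv_of_pos (by omega), hc,
          Int.mul_ediv_cancel_left _ (by omega)]
      have hclt : c < m := by nlinarith
      obtain ⟨k, m', h1, h2, h3, h4⟩ := ih c hc0 (by omega)
      refine ⟨k + 1, m', ?_, by rw [hc, h2]; ring, h3, h4⟩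
      simp only [pvStrip, hmod, hfd]
      exact h1
    · have hmod : (PySem.Int.mod m p == 0) = false := by
        rw [beq_eq_false_iff_ne]
        intro hc; exact hdvd ((PySem.Int.mod_eq_zero_iff_dvd m p).mp hc)
      refine ⟨0, m, ?_, by ring, hm, hdvd⟩
      simp only [pvStrip, hmod]
      simp

-- a prime divisor of p^k * m' is p or divides m'
lemma pv_prime_dvd_split (p : Int) (k : Nat) (m' q : Int) (hp2 : 2 ≤ p)
    (hpp : Nat.Prime p.toNat) (hq2 : 2 ≤ q) (hqp : Nat.Prime q.toNat)
    (hdvd : q ∣ p ^ k * m') (hqnep : q ≠ p) : q ∣ m' := by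
  have hqprime : Prime q := pv_int_prime q hq2 hqp
  rcases (Prime.dvd_mul hqprime).mp hdvd with h | h
  · exact absurd (pv_prime_dvd_prime q p hq2 hp2 hqp hpp (hqprime.dvd_of_dvd_pow h)) hqnep
  · exact h

-- smallest-candidate invariant forces p to be prime when p ∣ m
lemma pv_p_prime (m p : Int) (_hm : 0 < m) (hp : 2 ≤ p) (hdvd : p ∣ m)
    (hinv : ∀ q : Int, 2 ≤ q → Nat.Prime q.toNat → q ∣ m → p ≤ q) : Nat.Prime p.toNat := by
  obtain ⟨r, hr, hrdvd⟩ := Nat.exists_prime_and_dvd (n := p.toNat) (by omega)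
  have hrp : (r : Int) ∣ p := by
    have := Int.natCast_dvd_natCast.mpr hrdvd
    rwa [Int.toNat_of_nonneg (by omega)] at this
  have hr2 : 2 ≤ (r : Int) := by exact_mod_cast hr.two_le
  have hrm : (r : Int) ∣ m := dvd_trans hrp hdvd
  have h1 : p ≤ (r : Int) := hinv r hr2 (by simpa using hr) hrm
  have h2 : (r : Int) ≤ p := Int.le_of_dvd (by omega) hrp
  have : (r : Int) = p := by omega
  rw [← this]
  simpa using hr

-- stripping the least prime factor shifts pvOPF by (at most) its head
lemma pvOPF_step (p : Int) (k : Nat) (m m' : Int) (hp2 : 2 ≤ p)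
    (hpp : Nat.Prime p.toNat) (hk : 1 ≤ k) (hm' : 0 < m') (hnp : ¬ p ∣ m')
    (hm : m = p ^ k * m')
    (habove : ∀ q : Int, 2 ≤ q → Nat.Prime q.toNat → q ∣ m' → p < q) :
    pvOPF m = (if p = 2 then ([] : List Int) else [p]) ++ pvOPF m' := by
  have hmpos : 0 < m := by
    have : (0:Int) < p ^ k := pow_pos (by omega) k
    nlinarith
  have hpm : p ∣ m := by
    refine dvd_trans (dvd_pow_self p (by omega)) ⟨m', hm⟩
  have hm'm : m' ∣ m := ⟨p ^ k, by rw [hm]; ring⟩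
  apply pv_uniq_lt _ _ (pvOPF_pairwise m)
  · -- RHS pairwise
    by_cases hcase : p = 2
    · simp [hcase, pvOPF_pairwise]
    · simp only [if_neg hcase, List.singleton_append]
      rw [List.pairwise_cons]
      refine ⟨fun q hq => ?_, pvOPF_pairwise m'⟩
      have := (pvOPF_mem m' q hm').mp hq
      exact habove q (by omega) this.2.2 this.2.1
  · intro x
    rw [pvOPF_mem m x hmpos, List.mem_append]
    constructor
    · rintro ⟨hx3, hxd, hxp⟩
      by_cases hxep : x = p
      · subst hxep
        left
        have : ¬ x = 2 := by omega
        simp [this]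
      · right
        rw [pvOPF_mem m' x hm']
        refine ⟨hx3, ?_, hxp⟩
        exact pv_prime_dvd_split p k m' x hp2 hpp (by omega) hxp (hm ▸ hxd) hxep
    · rintro (hx | hx)
      · have hxp : x = p ∧ p ≠ 2 := by
          by_cases hcase : p = 2
          · simp [hcase] at hx
          · simp [hcase] at hx; exact ⟨hx, hcase⟩
        obtain ⟨rfl, hne2⟩ := hxp
        refine ⟨by omega, hpm, hpp⟩
      · have := (pvOPF_mem m' x hm').mp hx
        exact ⟨this.1, dvd_trans this.2.1 hm'm, this.2.2⟩

-- when the loop exits, m is 1, 2, or an odd prime, and pvOPF m is its remainder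
lemma pvOPF_final (m p : Int) (hm : 0 < m) (hp : 2 ≤ p) (hsmall : m < p * p)
    (hinv : ∀ q : Int, 2 ≤ q → Nat.Prime q.toNat → q ∣ m → p ≤ q) :
    pvOPF m = if 2 < m then [m] else [] := by
  rcases lt_or_ge m 3 with hm3 | hm3
  · -- m = 1 or 2 : pvOPF m = [] (the range 3..m+1 is empty)
    have : m = 1 ∨ m = 2 := by omega
    rcases this with rfl | rfl <;> simp [pvOPF, PySem.List.pyRange_one_eq_nil]
  · -- m ≥ 3, and m must be prime
    have hmprime : Nat.Prime m.toNat := by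
      by_contra hnp
      have h2 : 2 ≤ m.toNat := by omega
      have hminfac := Nat.minFac_prime (n := m.toNat) (by omega)
      have hmfd : (m.toNat.minFac : Int) ∣ m := by
        have := Int.natCast_dvd_natCast.mpr (Nat.minFac_dvd m.toNat)
        rwa [Int.toNat_of_nonneg (by omega)] at this
      have hmf2 : 2 ≤ (m.toNat.minFac : Int) := by exact_mod_cast hminfac.two_le
      have hple : p ≤ (m.toNat.minFac : Int) := hinv _ hmf2 (by simpa using hminfac) hmfd
      have hsq : m.toNat.minFac * m.toNat.minFac ≤ m.toNat := by
        have := Nat.minFac_sq_le_self (by omega) hnp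
        nlinarith [this]
      have : (m.toNat.minFac : Int) * (m.toNat.minFac : Int) ≤ m := by
        have := Int.ofNat_le.mpr hsq
        push_cast at this
        omega
      nlinarith
    rw [if_pos (by omega)]
    apply pv_uniq_lt _ _ (pvOPF_pairwise m)
    · simp
    · intro x
      rw [pvOPF_mem m x hm, List.mem_singleton]
      constructor
      · rintro ⟨hx3, hxd, hxp⟩
        have h1 : x.natAbs ∣ m.natAbs := Int.natAbs_dvd_natAbs.mpr hxd
        have h2 : x.natAbs = x.toNat := by omega
        have h3 : m.natAbs = m.toNat := by omega
        rw [h2, h3] at h1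
        rcases (Nat.Prime.eq_one_or_self_of_dvd hmprime _ h1) with h | h <;> omega
      · rintro rfl
        exact ⟨hm3, dvd_refl _, hmprime⟩

lemma pvLoopB_spec (n : Int) (_hn : 0 < n) :
    ∀ (fuel : Nat) (m p : Int) (lst : List Int),
      0 < m → m ∣ n → 2 ≤ p →
      (∀ q : Int, 2 ≤ q → Nat.Prime q.toNat → q ∣ m → p ≤ q) →
      (m + 1 - p).toNat < fuel →
      pvLoopB n fuel m p lst = lst ++ (pvOPF m).map (fun q => n / q) := by
  intro fuel
  induction fuel with
  | zero => intro m p lst _ _ _ _ hf; omega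
  | succ fuel ih =>
    intro m p lst hm hmn hp hinv hf
    by_cases hguard : p * p ≤ m
    · have hpmle : 2 * p ≤ p * p := by nlinarith
      rw [pvLoopB, if_pos hguard]
      by_cases hdvd : p ∣ m
      · have hpp : Nat.Prime p.toNat := pv_p_prime m p hm hp hdvd hinv
        have hmod : (PySem.Int.mod m p == 0) = true := by
          rw [beq_iff_eq]; exact (PySem.Int.mod_eq_zero_iff_dvd m p).mpr hdvd
        rw [hmod, if_pos rfl]
        obtain ⟨k, m', hstrip, hfact, hm'pos, hm'nd⟩ :=
          pvStrip_spec p hp m.toNat m hm (le_refl _)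
        have hk1 : 1 ≤ k := by
          by_contra hk0
          have : k = 0 := by omega
          rw [this, pow_zero, one_mul] at hfact
          exact hm'nd (hfact ▸ hdvd)
        have hpk : (0:Int) < p ^ k := pow_pos (by omega) k
        have hple : p ≤ p ^ k := by
          calc p = p ^ 1 := (pow_one p).symm
          _ ≤ p ^ k := pow_le_pow_right₀ (by omega) hk1
        have hm'le : m' ≤ m := by nlinarith [hfact]
        have hm'dvd : m' ∣ n := dvd_trans ⟨p ^ k, by rw [hfact]; ring⟩ hmn
        have habove : ∀ q : Int, 2 ≤ q → Nat.Prime q.toNat → q ∣ m' → p < q := by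
          intro q hq2 hqp hqd
          have h1 : p ≤ q := hinv q hq2 hqp (dvd_trans hqd ⟨p ^ k, by rw [hfact]; ring⟩)
          rcases eq_or_lt_of_le h1 with rfl | h
          · exact absurd hqd hm'nd
          · exact h
        rw [hstrip]
        rw [ih m' (p + 1) _ hm'pos hm'dvd (by omega)
          (fun q hq2 hqp hqd => by have := habove q hq2 hqp hqd; omega) (by omega)]
        rw [pvOPF_step p k m m' hp hpp hk1 hm'pos hm'nd hfact habove]
        by_cases hcase : p = 2
        · subst hcase
          simp
        · have hfdp : PySem.Int.floordiv n p = n / p := PySem.Int.floordiv_eq_ediv_of_pos (by omega)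
          simp [hcase, hfdp, List.append_assoc]
      · have hmod : (PySem.Int.mod m p == 0) = false := by
          rw [beq_eq_false_iff_ne]
          intro hc; exact hdvd ((PySem.Int.mod_eq_zero_iff_dvd m p).mp hc)
        rw [hmod]
        simp only [Bool.false_eq_true, if_false]
        apply ih m (p + 1) lst hm hmn (by omega) _ (by omega)
        intro q hq2 hqp hqd
        have h1 := hinv q hq2 hqp hqd
        rcases eq_or_lt_of_le h1 with rfl | h
        · exact absurd hqd hdvd
        · omega
    · rw [pvLoopB, if_neg hguard]
      rw [pvOPF_final m p hm hp (by omega) hinv]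
      by_cases hcase : 2 < m
      · have hfd : PySem.Int.floordiv n m = n / m := PySem.Int.floordiv_eq_ediv_of_pos (by omega)
        rw [if_pos hcase, if_pos hcase]
        simp [hfd]
      · rw [if_neg hcase, if_neg hcase]
        simp

lemma pvInnerB_eq (n : Int) (hn : 0 ≤ n) :
    pvInnerB n = (pvOPF n).map (fun q => n / q) := by
  rcases eq_or_lt_of_le hn with hz | hpos
  · subst hz; decide
  · unfold pvInnerB
    rw [pvLoopB_spec n hpos (n.toNat + 1) n 2 [] hpos (dvd_refl n) (by omega)
      (fun q hq2 _ _ => hq2) (by omega)]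
    simp

lemma pv_main (n : Int) (hn : 0 ≤ n) : pvRowA n = pvInnerB n := by
  rw [pvRowA_eq n hn, pvInnerB_eq n hn]

-- ===== VERDICT (by name: the statement is the Claim_ definition above) =====
theorem generate_divisor_list_spec : Claim_equal_generate_divisor_list := by
  intro N _
  unfold Spec_generate_divisor_list generate_divisor_list generate_divisor_list_alt
  congr 1
  apply PySem.List.foldl_congr_mem
  intro acc x hx
  rw [pv_main x (by have := (PySem.List.mem_pyRange_one).mp hx; omega)]
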